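-- pv_equiv track=rewrite | github.com/imiolek-ireneusz/eduActiv8 | classes/rtl/ctfribidi.py | insert_markers
-- ===== SOURCE A (Python) =====
-- def insert_markers(s, levels, pbase_dir=1):
--     if not s:
--         return
--     start_markers = (u'\u202a', u'\u202b')  # LRE, RLE = l-r and r-l embedding
--     end_marker = u'\u202c'  # PDF = pop directional formatting
--     dir_i = pbase_dir
--     assert (0 == dir_i) or (1 == dir_i)
--     while pbase_dir > levels[0]:
--         pbase_dir = pbase_dir - 2
--     last_level = pbase_dir
--     a = []
--     lvl = None
--     for (ch, lvl) in zip(s, levels):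
--         while lvl > last_level:
--             dir_i = 1 - dir_i
--             a.append(start_markers[dir_i])
--             last_level = last_level + 1
--         while lvl < last_level:
--             dir_i = 1 - dir_i
--             a.append(end_marker)
--             last_level = last_level - 1
--         a.append(ch)
--     if lvl is not None:
--         while lvl > pbase_dir:
--             a.append(end_marker)
--             lvl = lvl - 1
--     return u''.join(a)
-- ===== SOURCE B (Python) =====
-- def insert_markers(s, levels, pbase_dir=1):
--     # Stateless staged pipeline: closed-form base clamp, explicit level
--     # sequence, a pure pairwise transition map zipped with the characters;
--     # no dir_i/last_level mutation and no inner while-loops.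
--     if not s:
--         return None
--     if pbase_dir > levels[0]:
--         base = pbase_dir - 2 * ((pbase_dir - levels[0] + 1) // 2)
--     else:
--         base = pbase_dir
--     lv = [base] + [lvl for _, lvl in zip(s, levels)]
--     trans = [_updown(p, c) for p, c in zip(lv, lv[1:])]
--     body = ''.join(t + ch for t, ch in zip(trans, s))
--     return body + u'\u202c' * (lv[-1] - base)
--
--
-- def _updown(p, c):
--     if p < c:
--         return ''.join(u'\u202a\u202b'[k & 1] for k in range(p + 1, c + 1))
--     return u'\u202c' * (p - c)
-- ===== Notes on version B (the rewrite author's own statement) =====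
-- stated objective: alternative
-- what changed: B replaces A's stateful streaming pass (dir_i/last_level mutation and three inner while-loops) by a stateless staged pipeline: a closed-form base clamp, an explicit level sequence [base]+levels, a pure pairwise transition function mapped over adjacent level pairs and zipped with the characters, and a closed-form trailing pop.
import Mathlib
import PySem

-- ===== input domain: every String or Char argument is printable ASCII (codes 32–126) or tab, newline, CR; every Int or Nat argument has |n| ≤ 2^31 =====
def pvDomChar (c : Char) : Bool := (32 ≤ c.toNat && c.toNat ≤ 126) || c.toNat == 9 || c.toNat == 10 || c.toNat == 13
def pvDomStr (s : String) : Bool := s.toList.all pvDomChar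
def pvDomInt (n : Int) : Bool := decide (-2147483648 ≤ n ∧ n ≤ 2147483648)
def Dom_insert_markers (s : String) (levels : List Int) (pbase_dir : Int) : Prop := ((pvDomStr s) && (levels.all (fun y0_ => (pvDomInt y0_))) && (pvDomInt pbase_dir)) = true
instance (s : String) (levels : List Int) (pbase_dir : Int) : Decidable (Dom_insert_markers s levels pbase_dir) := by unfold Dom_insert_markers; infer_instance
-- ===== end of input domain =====

-- B replaces A's stateful streaming pass (dir_i/last_level mutation, three inner
-- while-loops) by a stateless staged pipeline (closed-form base clamp, explicit
-- level sequence, pure pairwise transition map zipped with the characters); objective: alternative.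

-- ===== PORT A =====
def pvLRE : String := "\u202A"
def pvRLE : String := "\u202B"
def pvPDF : String := "\u202C"

-- while pbase_dir > levels[0]: pbase_dir = pbase_dir - 2
def pvAdjA (p l0 : Int) : Int :=
  if l0 < p then pvAdjA (p - 2) l0 else p
termination_by (p - l0).toNat
decreasing_by omega

-- while lvl > last_level: dir_i = 1 - dir_i; a.append(start_markers[dir_i]); last_level += 1
def pvPush (lvl last dir : Int) (a : List String) : Int × Int × List String :=
  if last < lvl then
    pvPush lvl (last + 1) (1 - dir) (a ++ [(PySem.List.pyGet? [pvLRE, pvRLE] (1 - dir)).getD ""])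
  else (last, dir, a)
termination_by (lvl - last).toNat
decreasing_by omega

-- while lvl < last_level: dir_i = 1 - dir_i; a.append(end_marker); last_level -= 1
def pvPop (lvl last dir : Int) (a : List String) : Int × Int × List String :=
  if lvl < last then pvPop lvl (last - 1) (1 - dir) (a ++ [pvPDF]) else (last, dir, a)
termination_by (last - lvl).toNat
decreasing_by omega

-- trailing: while lvl > pbase_dir: a.append(end_marker); lvl -= 1
def pvTailA (lvl pb : Int) (a : List String) : List String :=
  if pb < lvl then pvTailA (lvl - 1) pb (a ++ [pvPDF]) else a
termination_by (lvl - pb).toNat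
decreasing_by omega

-- the body of A's for-loop; state is (last_level, dir_i, a, lvl)
def pvStepA (st : Int × Int × List String × Option Int) (p : Char × Int) :
    Int × Int × List String × Option Int :=
  let r1 := pvPush p.2 st.1 st.2.1 st.2.2.1
  let r2 := pvPop p.2 r1.1 r1.2.1 r1.2.2
  (r2.1, r2.2.1, r2.2.2 ++ [String.ofList [p.1]], some p.2)

-- A's `assert` (pbase_dir not 0/1) and the IndexError from levels[0] (s nonempty,
-- levels empty) raise in Python; those inputs are excluded by Pre_insert_markers.
def insert_markers (s : String) (levels : List Int) (pbase_dir : Int) : Option String :=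
  if s.toList = [] then none
  else
    match PySem.List.pyGet? levels 0 with
    | none => none  -- levels[0] raises IndexError: outside Pre_
    | some l0 =>
      let pb := pvAdjA pbase_dir l0
      let st := (s.toList.zip levels).foldl pvStepA (pb, pbase_dir, ([] : List String), (none : Option Int))
      let a := match st.2.2.2 with
        | none => st.2.2.1
        | some lvl => pvTailA lvl pb st.2.2.1
      some (PySem.Str.join "" a)

-- ===== PORT B =====
-- '\u202a\u202b'[k & 1]  (as a 1-char string)
def pvMarkStrB (k : Int) : String :=
  ((PySem.Str.pyGet? "\u202A\u202B" (PySem.Int.band k 1)).map (fun c => String.ofList [c])).getD ""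

-- _updown(p, c): the pure transition string between two adjacent levels
def pvUpdownB (p c : Int) : String :=
  if p < c then PySem.Str.join "" ((PySem.List.pyRange (p + 1) (c + 1) 1).map pvMarkStrB)
  else String.ofList (List.replicate (p - c).toNat '\u202C')

def insert_markers_alt (s : String) (levels : List Int) (pbase_dir : Int) : Option String :=
  if s.toList = [] then none
  else
    match PySem.List.pyGet? levels 0 with
    | none => none  -- levels[0] raises IndexError in B too
    | some l0 =>
      let base := if l0 < pbase_dir then pbase_dir - 2 * PySem.Int.floordiv (pbase_dir - l0 + 1) 2 else pbase_dir
      let lv := base :: (s.toList.zip levels).map Prod.snd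
      let trans := (lv.zip lv.tail).map (fun p => pvUpdownB p.1 p.2)
      let body := PySem.Str.join "" ((trans.zip s.toList).map (fun p => p.1 ++ String.ofList [p.2]))
      some (body ++ String.ofList (List.replicate (PySem.List.pyGetD lv (-1) 0 - base).toNat '\u202C'))

-- ===== PRECONDITION & SPEC =====
-- Pre_ excludes exactly the inputs where A raises: IndexError on levels[0] (s nonempty,
-- levels empty) and AssertionError (s nonempty, pbase_dir not 0 or 1).
def Pre_insert_markers (s : String) (levels : List Int) (pbase_dir : Int) : Prop :=
  s.toList = [] ∨ (levels ≠ [] ∧ (pbase_dir = 0 ∨ pbase_dir = 1))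
instance (s : String) (levels : List Int) (pbase_dir : Int) : Decidable (Pre_insert_markers s levels pbase_dir) := by unfold Pre_insert_markers; infer_instance

def pvWitness_insert_markers : String × List Int × Int := ("ab", ([0, 1], 1))

def Spec_insert_markers (s : String) (levels : List Int) (pbase_dir : Int) (out : Option String) : Prop := out = insert_markers_alt s levels pbase_dir
instance (s : String) (levels : List Int) (pbase_dir : Int) (out : Option String) : Decidable (Spec_insert_markers s levels pbase_dir out) := by unfold Spec_insert_markers; infer_instance

-- ===== CLAIM (what is proved, stated in full; the proofs are below) =====
def Claim_equal_insert_markers : Prop := ∀ (s : String) (levels : List Int) (pbase_dir : Int), Dom_insert_markers s levels pbase_dir → Pre_insert_markers s levels pbase_dir → Spec_insert_markers s levels pbase_dir (insert_markers s levels pbase_dir)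

-- ===== LEMMAS AND PROOFS =====

-- the character content of a list of string pieces
def pvFlat (a : List String) : List Char := (a.map String.toList).flatten

-- the run of start markers A pushes going from level `last` up to `lvl`
def pvMarks (last lvl : Int) : List String :=
  (PySem.List.pyRange (last + 1) (lvl + 1) 1).map (fun k => if PySem.Int.mod k 2 = 1 then pvRLE else pvLRE)

-- what A's for-loop body emits for one (ch, lvl) pair, chained over the list
def pvEmitA (last : Int) : List (Char × Int) → List String
  | [] => []
  | (ch, lvl) :: tl =>
      pvMarks last lvl ++ List.replicate (last - lvl).toNat pvPDF
        ++ [String.ofList [ch]] ++ pvEmitA lvl tl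

lemma pvFlatten_intersperse : ∀ (l : List (List Char)), (List.intersperse ([] : List Char) l).flatten = l.flatten
  | [] => rfl
  | [_] => rfl
  | a :: b :: t => by
    rw [List.intersperse_cons₂]
    simp [pvFlatten_intersperse (b :: t)]

lemma pvJoin_toList (a : List String) : (PySem.Str.join "" a).toList = pvFlat a := by
  rw [PySem.Str.toList_join]
  simp [PySem.Chars.join, List.intercalate, pvFlat, pvFlatten_intersperse]

lemma pvFlat_append (a b : List String) : pvFlat (a ++ b) = pvFlat a ++ pvFlat b := by
  simp [pvFlat]

lemma pvMod_two_self (p : Int) (hp : p = 0 ∨ p = 1) : PySem.Int.mod p 2 = p := by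
  rcases hp with h | h <;> subst h <;> decide

lemma pvMod_succ (x : Int) : 1 - PySem.Int.mod x 2 = PySem.Int.mod (x + 1) 2 := by
  rw [PySem.Int.mod_eq_emod_of_pos (by omega), PySem.Int.mod_eq_emod_of_pos (by omega)]
  omega

lemma pvMod_pred (x : Int) : 1 - PySem.Int.mod x 2 = PySem.Int.mod (x - 1) 2 := by
  rw [PySem.Int.mod_eq_emod_of_pos (by omega), PySem.Int.mod_eq_emod_of_pos (by omega)]
  omega

lemma pvAdjA_eq (p l0 : Int) :
    pvAdjA p l0 = if l0 < p then p - 2 * PySem.Int.floordiv (p - l0 + 1) 2 else p := by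
  rw [pvAdjA]
  split_ifs with h
  · rw [pvAdjA_eq (p - 2) l0]
    rw [PySem.Int.floordiv_eq_ediv_of_pos (by omega), PySem.Int.floordiv_eq_ediv_of_pos (by omega)]
    split_ifs with h2 <;> omega
  · rfl
termination_by (p - l0).toNat
decreasing_by omega

lemma pvAdjA_mod (p l0 : Int) : PySem.Int.mod (pvAdjA p l0) 2 = PySem.Int.mod p 2 := by
  rw [pvAdjA_eq]
  split_ifs with h
  · rw [PySem.Int.mod_eq_emod_of_pos (by omega), PySem.Int.mod_eq_emod_of_pos (by omega)]
    omega
  · rfl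

lemma pvPush_eq (lvl last : Int) (a : List String) :
    pvPush lvl last (PySem.Int.mod last 2) a
      = (max last lvl, PySem.Int.mod (max last lvl) 2, a ++ pvMarks last lvl) := by
  rw [pvPush]
  split_ifs with h
  · rw [pvMod_succ]
    rw [pvPush_eq lvl (last + 1)]
    have hmax : max (last + 1) lvl = max last lvl := by omega
    have hmarks : pvMarks last lvl
        = (if PySem.Int.mod (last + 1) 2 = 1 then pvRLE else pvLRE) :: pvMarks (last + 1) lvl := by
      unfold pvMarks
      rw [PySem.List.pyRange_one_cons (by omega)]
      simp
    have hmark : (PySem.List.pyGet? [pvLRE, pvRLE] (PySem.Int.mod (last + 1) 2)).getD ""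
        = (if PySem.Int.mod (last + 1) 2 = 1 then pvRLE else pvLRE) := by
      rcases PySem.Int.mod_two_eq (last + 1) with h2 | h2 <;> rw [h2] <;> decide
    rw [hmax, hmarks, hmark]
    simp
  · have hmax : max last lvl = last := by omega
    have : pvMarks last lvl = [] := by
      unfold pvMarks
      rw [PySem.List.pyRange_one_eq_nil (by omega)]
      rfl
    rw [hmax, this]
    simp
termination_by (lvl - last).toNat
decreasing_by omega

lemma pvPop_eq (lvl last : Int) (a : List String) :
    pvPop lvl last (PySem.Int.mod last 2) a
      = (min last lvl, PySem.Int.mod (min last lvl) 2, a ++ List.replicate (last - lvl).toNat pvPDF) := by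
  rw [pvPop]
  split_ifs with h
  · rw [pvMod_pred]
    rw [pvPop_eq lvl (last - 1)]
    have hmin : min (last - 1) lvl = min last lvl := by omega
    have hrep : List.replicate (last - lvl).toNat pvPDF
        = pvPDF :: List.replicate (last - 1 - lvl).toNat pvPDF := by
      have : (last - lvl).toNat = (last - 1 - lvl).toNat + 1 := by omega
      rw [this, List.replicate_succ]
    rw [hmin, hrep]
    simp
  · have hmin : min last lvl = last := by omega
    have : (last - lvl).toNat = 0 := by omega
    rw [hmin, this]
    simp
termination_by (last - lvl).toNat
decreasing_by omega

lemma pvTailA_eq (lvl pb : Int) (a : List String) :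
    pvTailA lvl pb a = a ++ List.replicate (lvl - pb).toNat pvPDF := by
  rw [pvTailA]
  split_ifs with h
  · rw [pvTailA_eq (lvl - 1) pb]
    have : (lvl - pb).toNat = (lvl - 1 - pb).toNat + 1 := by omega
    rw [this, List.replicate_succ]
    simp
  · have : (lvl - pb).toNat = 0 := by omega
    rw [this]
    simp
termination_by (lvl - pb).toNat
decreasing_by omega

lemma pvMarkStrB_toList (k : Int) :
    (pvMarkStrB k).toList = (if PySem.Int.mod k 2 = 1 then pvRLE else pvLRE).toList := by
  unfold pvMarkStrB
  rw [PySem.Int.band_one]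
  rcases PySem.Int.mod_two_eq k with h | h <;> rw [h] <;> decide

lemma pvFlat_singleton (s : String) : pvFlat [s] = s.toList := by simp [pvFlat]

lemma pvFlat_replicate_PDF (n : Nat) : pvFlat (List.replicate n pvPDF) = List.replicate n '\u202C' := by
  unfold pvFlat
  rw [List.map_replicate]
  have : pvPDF.toList = ['\u202C'] := by decide
  rw [this, List.flatten_replicate_singleton]

lemma pvUpdownB_toList (p c : Int) :
    (pvUpdownB p c).toList
      = pvFlat (pvMarks p c ++ List.replicate (p - c).toNat pvPDF) := by
  unfold pvUpdownB
  split_ifs with h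
  · have h0 : (p - c).toNat = 0 := by omega
    rw [h0]
    simp only [List.replicate_zero, List.append_nil]
    rw [pvJoin_toList]
    unfold pvFlat pvMarks
    rw [List.map_map, List.map_map]
    congr 1
    exact List.map_congr_left (fun k _ => pvMarkStrB_toList k)
  · have h0 : pvMarks p c = [] := by
      unfold pvMarks
      rw [PySem.List.pyRange_one_eq_nil (by omega)]
      rfl
    rw [h0, List.nil_append, pvFlat_replicate_PDF]
    simp

-- ((x :: l).getLast?).getD y = (l.getLast?).getD x
lemma pvGetLastD_cons (x y : Int) (l : List Int) :
    ((x :: l).getLast?).getD y = (l.getLast?).getD x := by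
  cases l with
  | nil => simp
  | cons a b =>
    rw [List.getLast?_cons_cons]
    cases h : (a :: b).getLast? with
    | none => simp at h
    | some z => simp

-- A's foldl computes pvEmitA and ends at the last zipped level
lemma pvLoopA : ∀ (ps : List (Char × Int)) (last : Int) (aA : List String) (l? : Option Int),
    ps.foldl pvStepA (last, PySem.Int.mod last 2, aA, l?)
      = (((ps.map Prod.snd).getLast?).getD last,
         PySem.Int.mod (((ps.map Prod.snd).getLast?).getD last) 2,
         aA ++ pvEmitA last ps,
         if ps = [] then l? else some (((ps.map Prod.snd).getLast?).getD last))
  | [], last, aA, l? => by simp [pvEmitA]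
  | (ch, lvl) :: tl, last, aA, l? => by
    have hstepA : pvStepA (last, PySem.Int.mod last 2, aA, l?) (ch, lvl)
        = (lvl, PySem.Int.mod lvl 2,
           aA ++ (pvMarks last lvl ++ List.replicate (last - lvl).toNat pvPDF ++ [String.ofList [ch]]), some lvl) := by
      simp only [pvStepA]
      rw [pvPush_eq]
      simp only
      rw [pvPop_eq]
      have h1 : min (max last lvl) lvl = lvl := by omega
      have h2 : (max last lvl - lvl).toNat = (last - lvl).toNat := by omega
      simp only [h1, h2, List.append_assoc]
    rw [List.foldl_cons, hstepA, pvLoopA tl lvl]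
    have hlast : ((tl.map Prod.snd).getLast?).getD lvl
        = (((lvl :: tl.map Prod.snd).getLast?).getD last) := by
      rw [pvGetLastD_cons]
    have hemit : aA ++ (pvMarks last lvl ++ List.replicate (last - lvl).toNat pvPDF ++ [String.ofList [ch]]) ++ pvEmitA lvl tl
        = aA ++ pvEmitA last ((ch, lvl) :: tl) := by
      simp [pvEmitA, List.append_assoc]
    by_cases htl : tl = []
    · subst htl
      simp [pvEmitA, List.append_assoc]
    · simp only [List.map_cons, hlast, hemit, htl]
      simp

-- zipping with the full char list equals zipping with the zipped-out chars
lemma pvZipPrefix {α β γ : Type} : ∀ (ts : List α) (cs : List β) (ls : List γ),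
    ts.length = (cs.zip ls).length →
    ts.zip cs = ts.zip ((cs.zip ls).map Prod.fst)
  | [], cs, ls, _ => by simp
  | t :: ts, [], ls, h => by simp at h
  | t :: ts, c :: cs, [], h => by simp at h
  | t :: ts, c :: cs, l :: ls, h => by
    simp only [List.zip_cons_cons, List.length_cons, List.length_zip] at h
    simp only [List.zip_cons_cons, List.map_cons]
    rw [pvZipPrefix ts cs ls (by simp only [List.length_zip]; omega)]

-- B's staged pipeline flattens to what A's loop emits
lemma pvBodyB : ∀ (ps : List (Char × Int)) (prev : Int),
    pvFlat (((((prev :: ps.map Prod.snd).zip (ps.map Prod.snd)).map (fun p => pvUpdownB p.1 p.2)).zip (ps.map Prod.fst)).map (fun p => p.1 ++ String.ofList [p.2]))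
      = pvFlat (pvEmitA prev ps)
  | [], prev => by simp [pvEmitA, pvFlat]
  | (ch, lvl) :: tl, prev => by
    simp only [List.map_cons, List.zip_cons_cons]
    have hcons : pvFlat ((pvUpdownB prev lvl ++ String.ofList [ch])
          :: ((((lvl :: tl.map Prod.snd).zip (tl.map Prod.snd)).map (fun p => pvUpdownB p.1 p.2)).zip (tl.map Prod.fst)).map (fun p => p.1 ++ String.ofList [p.2]))
        = (pvUpdownB prev lvl ++ String.ofList [ch]).toList
          ++ pvFlat (((((lvl :: tl.map Prod.snd).zip (tl.map Prod.snd)).map (fun p => pvUpdownB p.1 p.2)).zip (tl.map Prod.fst)).map (fun p => p.1 ++ String.ofList [p.2])) := by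
      simp [pvFlat]
    rw [hcons, pvBodyB tl lvl]
    simp only [pvEmitA, pvFlat_append, pvFlat_singleton]
    rw [String.toList_append, pvUpdownB_toList, pvFlat_append]

-- ===== VERDICT (by name: the statement is the Claim_ definition above) =====
set_option maxHeartbeats 1000000 in
theorem insert_markers_spec : Claim_equal_insert_markers := by
  intro s levels pbase_dir _ hpre
  unfold Spec_insert_markers insert_markers insert_markers_alt
  by_cases hs : s.toList = []
  · simp [hs]
  · rcases hpre with h | ⟨hlev, hpb⟩
    · exact absurd h hs
    obtain ⟨l0, rest, rfl⟩ : ∃ l0 rest, levels = l0 :: rest := by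
      cases levels with
      | nil => exact absurd rfl hlev
      | cons a b => exact ⟨a, b, rfl⟩
    obtain ⟨c, cs, hsl⟩ : ∃ c cs, s.toList = c :: cs := by
      cases hh : s.toList with
      | nil => exact absurd hh hs
      | cons a b => exact ⟨a, b, rfl⟩
    have hget : PySem.List.pyGet? (l0 :: rest) (0 : Int) = some l0 := by simp [pysem]
    simp only [hs, if_false, hget]
    set base := (if l0 < pbase_dir then pbase_dir - 2 * PySem.Int.floordiv (pbase_dir - l0 + 1) 2 else pbase_dir) with hbase
    have hA0 : pvAdjA pbase_dir l0 = base := by rw [hbase]; exact pvAdjA_eq pbase_dir l0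
    rw [hA0]
    have hdir : pbase_dir = PySem.Int.mod base 2 := by
      rw [← hA0, pvAdjA_mod, pvMod_two_self pbase_dir hpb]
    rw [hdir]
    set ps := s.toList.zip (l0 :: rest) with hps
    have hzip : ps ≠ [] := by rw [hps, hsl]; simp [List.zip]
    rw [pvLoopA ps base [] none]
    simp only [if_neg hzip, List.nil_append]
    rw [pvTailA_eq]
    congr 1
    -- last element of lv
    have hlv : PySem.List.pyGetD (base :: ps.map Prod.snd) (-1) (0 : Int)
        = ((ps.map Prod.snd).getLast?).getD base := by
      rw [PySem.List.pyGetD_neg_one (base :: ps.map Prod.snd) 0 (by simp)]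
      rw [← pvGetLastD_cons base (0 : Int)]
      rw [List.getLast?_eq_some_getLast (by simp : (base :: ps.map Prod.snd) ≠ [])]
      simp
    -- compare as char lists
    rw [← String.toList_inj]
    rw [String.toList_append, pvJoin_toList, pvJoin_toList, pvFlat_append, pvFlat_replicate_PDF]
    have htail : (base :: ps.map Prod.snd).tail = ps.map Prod.snd := rfl
    rw [htail]
    rw [pvZipPrefix (((base :: ps.map Prod.snd).zip (ps.map Prod.snd)).map (fun p => pvUpdownB p.1 p.2)) s.toList (l0 :: rest) (by simp [List.length_zip, hps])]
    have hchars : (s.toList.zip (l0 :: rest)).map Prod.fst = ps.map Prod.fst := by rw [hps]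
    rw [hchars, pvBodyB ps base, hlv]
    simp
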